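-- pv_equiv track=rewrite | github.com/Joseph-k-iype/rules-engine | ontology_rego_converter.py | _sort_rule_conditions
-- ===== SOURCE A (Python) =====
-- from typing import Dict, List, Any, Optional, Set, Tuple, Union
--
-- def _sort_rule_conditions(conditions: List[str]) -> List[str]:
--     """Sort rule conditions for optimal evaluation order"""
--     simple_conditions = []
--     complex_conditions = []
--
--     for condition in conditions:
--         stripped = condition.strip()
--         # Simple equality checks first (fast to evaluate)
--         if '==' in stripped and 'input.' in stripped:
--             simple_conditions.append(condition)
--         # Complex conditions (function calls, nested logic) later
--         else:
--             complex_conditions.append(condition)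
--
--     return simple_conditions + complex_conditions
-- ===== SOURCE B (Python) =====
-- from typing import List
--
-- def _sort_rule_conditions(conditions: List[str]) -> List[str]:
--     """Sort rule conditions for optimal evaluation order"""
--     def key(c: str) -> int:
--         s = c.strip()
--         return 0 if ('==' in s and 'input.' in s) else 1
--     return sorted(conditions, key=key)
-- ===== Notes on version B (the rewrite author's own statement) =====
-- stated objective: idiomatic
-- what changed: Replaced the two-accumulator partition loop with a single stable sort on a 0/1 key; sort stability guarantees the same order as A's simple+complex concatenation.
import Mathlib
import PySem

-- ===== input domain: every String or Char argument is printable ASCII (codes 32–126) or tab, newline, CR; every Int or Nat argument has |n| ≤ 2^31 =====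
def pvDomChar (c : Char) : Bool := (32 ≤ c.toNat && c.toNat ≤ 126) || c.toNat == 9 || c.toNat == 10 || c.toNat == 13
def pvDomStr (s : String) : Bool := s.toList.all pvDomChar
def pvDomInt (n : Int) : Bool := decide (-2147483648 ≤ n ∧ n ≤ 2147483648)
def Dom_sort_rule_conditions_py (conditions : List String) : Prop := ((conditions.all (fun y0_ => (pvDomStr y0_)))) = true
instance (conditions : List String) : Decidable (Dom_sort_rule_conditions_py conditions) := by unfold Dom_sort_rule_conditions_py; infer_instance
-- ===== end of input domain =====

-- B replaces A's two-accumulator partition loop with one stable sort on a 0/1 key (idiomatic; same result by stability).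

-- ===== PORT A =====
-- "'==' in stripped and 'input.' in stripped" for stripped = condition.strip()
def pvIsSimple (condition : String) : Bool :=
  PySem.Str.isIn "==" (PySem.Str.strip condition) && PySem.Str.isIn "input." (PySem.Str.strip condition)

-- the for-loop accumulating (simple_conditions, complex_conditions), then their concatenation
def sort_rule_conditions_py (conditions : List String) : List String :=
  let acc := conditions.foldl
    (fun (acc : List String × List String) condition =>
      if pvIsSimple condition then (acc.1 ++ [condition], acc.2)
      else (acc.1, acc.2 ++ [condition]))
    ([], [])
  acc.1 ++ acc.2

-- ===== PORT B =====
-- key(c) = 0 if simple else 1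
def pvKey (c : String) : Int := if pvIsSimple c then 0 else 1

def sort_rule_conditions_py_alt (conditions : List String) : List String :=
  PySem.List.sorted conditions pvKey false

-- ===== PRECONDITION & SPEC =====
def Spec_sort_rule_conditions_py (conditions : List String) (out : List String) : Prop := out = sort_rule_conditions_py_alt conditions
instance (conditions : List String) (out : List String) : Decidable (Spec_sort_rule_conditions_py conditions out) := by unfold Spec_sort_rule_conditions_py; infer_instance

-- ===== CLAIM (what is proved, stated in full; the proofs are below) =====
def Claim_equal_sort_rule_conditions_py : Prop := ∀ (conditions : List String), Dom_sort_rule_conditions_py conditions → Spec_sort_rule_conditions_py conditions (sort_rule_conditions_py conditions)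

-- ===== LEMMAS AND PROOFS =====

-- the comparison PySem.List.sorted uses for key pvKey
def pvBefore (a b : String) : Bool := decide (pvKey a < pvKey b)

-- inserting a simple element into (simples ++ complexes) lands at the end of the simple block
theorem pv_insert_simple (x : String) (hx : pvIsSimple x = true) :
    ∀ (A B : List String), (∀ a ∈ A, pvIsSimple a = true) → (∀ b ∈ B, pvIsSimple b = false) →
      PySem.List.insertBy pvBefore x (A ++ B) = A ++ x :: B := by
  intro A
  induction A with
  | nil =>
    intro B _ hB
    cases B with
    | nil => simp [PySem.List.insertBy]
    | cons b bs =>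
      have hb : pvIsSimple b = false := hB b (by simp)
      simp [PySem.List.insertBy, pvBefore, pvKey, hx, hb]
  | cons a A' ih =>
    intro B hA hB
    have ha : pvIsSimple a = true := hA a (by simp)
    have : pvBefore x a = false := by simp [pvBefore, pvKey, hx, ha]
    simp only [List.cons_append, PySem.List.insertBy, this, Bool.false_eq_true, if_false]
    rw [ih B (fun a' h => hA a' (by simp [h])) hB]

-- inserting a complex element never goes before anything (all keys ≤ 1): it lands at the very end
theorem pv_insert_complex (x : String) (hx : pvIsSimple x = false) (L : List String) :
    PySem.List.insertBy pvBefore x L = L ++ [x] := by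
  apply PySem.List.insertBy_of_forall_not_before
  intro y _
  simp only [pvBefore, pvKey, hx, Bool.false_eq_true, if_false, decide_eq_false_iff_not, not_lt]
  split <;> omega

-- the insertion-sort fold, started from a partitioned accumulator, produces the partition
theorem pv_fold_partition (xs : List String) :
    ∀ (A B : List String), (∀ a ∈ A, pvIsSimple a = true) → (∀ b ∈ B, pvIsSimple b = false) →
      xs.foldl (fun acc x => PySem.List.insertBy pvBefore x acc) (A ++ B)
        = (A ++ xs.filter (fun c => pvIsSimple c)) ++ (B ++ xs.filter (fun c => !pvIsSimple c)) := by
  induction xs with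
  | nil => intro A B _ _; simp
  | cons x xs ih =>
    intro A B hA hB
    by_cases hx : pvIsSimple x = true
    · rw [List.foldl_cons, pv_insert_simple x hx A B hA hB,
          show A ++ x :: B = (A ++ [x]) ++ B by simp]
      rw [ih (A ++ [x]) B ?_ hB]
      · simp [hx]
      · intro a ha
        rcases List.mem_append.mp ha with h | h
        · exact hA a h
        · simp at h; exact h ▸ hx
    · have hx' : pvIsSimple x = false := by simpa using hx
      rw [List.foldl_cons, pv_insert_complex x hx' (A ++ B), List.append_assoc]
      rw [ih A (B ++ [x]) hA ?_]
      · simp [hx']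
      · intro b hb
        rcases List.mem_append.mp hb with h | h
        · exact hB b h
        · simp at h; exact h ▸ hx'

-- A's fold, from a partitioned pair accumulator, computes the two filters
theorem pv_foldA (xs : List String) :
    ∀ (S C : List String),
      xs.foldl (fun (acc : List String × List String) condition =>
          if pvIsSimple condition then (acc.1 ++ [condition], acc.2)
          else (acc.1, acc.2 ++ [condition])) (S, C)
        = (S ++ xs.filter (fun c => pvIsSimple c), C ++ xs.filter (fun c => !pvIsSimple c)) := by
  induction xs with
  | nil => intro S C; simp
  | cons x xs ih =>
    intro S C
    by_cases hx : pvIsSimple x = true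
    · simp [hx, ih]
    · have hx' : pvIsSimple x = false := by simpa using hx
      simp [hx', ih]

-- ===== VERDICT (by name: the statement is the Claim_ definition above) =====
theorem sort_rule_conditions_py_spec : Claim_equal_sort_rule_conditions_py := by
  intro conditions _
  unfold Spec_sort_rule_conditions_py sort_rule_conditions_py sort_rule_conditions_py_alt
  rw [PySem.List.sorted_eq_foldl_insertBy]
  have hB := pv_fold_partition conditions [] [] (by simp) (by simp)
  have hA := pv_foldA conditions [] []
  simp only [List.nil_append] at hB hA
  rw [hA]
  simp only
  rw [← hB]
  rfl
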